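-- pv_equiv track=rewrite | github.com/DavidOgunsola17/CoachResearchAgent | agents/discovery.py | _heuristic_prioritize
-- ===== SOURCE A (Python) =====
-- from typing import List
--
-- def _heuristic_prioritize(urls: List[str]) -> List[str]:
--     """
--     Heuristic prioritization when OpenAI search is unavailable.
--
--     Args:
--         urls: List of URLs to prioritize
--
--     Returns:
--         Prioritized list
--     """
--     if not urls:
--         return []
--
--     def score_url(url: str) -> int:
--         score = 0
--         url_lower = url.lower()
--
--         # Prefer .edu domains
--         if '.edu' in url_lower:
--             score += 10
--
--         # Prefer athletics subdomains
--         if 'athletics' in url_lower: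
--             score += 5
--
--         # Prefer keywords
--         if 'staff' in url_lower or 'coaches' in url_lower:
--             score += 3
--
--         if 'roster' in url_lower:
--             score += 2
--
--         # Penalize social media and news
--         if any(site in url_lower for site in ['twitter', 'facebook', 'instagram', 'linkedin', 'youtube']):
--             score -= 20
--
--         if any(site in url_lower for site in ['news', 'article', 'blog', 'medium']):
--             score -= 10
--
--         return score
--
--     scored = [(url, score_url(url)) for url in urls]
--     scored.sort(key=lambda x: x[1], reverse=True)
--
--     return [url for url, score in scored if score > 0]
-- ===== SOURCE B (Python) =====
-- from typing import List
--
--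
-- def _score_url(url: str) -> int:
--     score = 0
--     url_lower = url.lower()
--     if '.edu' in url_lower:
--         score += 10
--     if 'athletics' in url_lower:
--         score += 5
--     if 'staff' in url_lower or 'coaches' in url_lower:
--         score += 3
--     if 'roster' in url_lower:
--         score += 2
--     if any(site in url_lower for site in ['twitter', 'facebook', 'instagram', 'linkedin', 'youtube']):
--         score -= 20
--     if any(site in url_lower for site in ['news', 'article', 'blog', 'medium']):
--         score -= 10
--     return score
--
--
-- def _heuristic_prioritize(urls: List[str]) -> List[str]:
--     # Group URLs into score buckets (insertion order keeps stability),
--     # then emit buckets by descending score, positive scores only.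
--     buckets = {}
--     for url in urls:
--         buckets.setdefault(_score_url(url), []).append(url)
--     result = []
--     for s in sorted(buckets, reverse=True):
--         if s > 0:
--             result.extend(buckets[s])
--     return result
-- ===== Notes on version B (the rewrite author's own statement) =====
-- stated objective: alternative
-- what changed: Replaces the stable comparison sort over (url, score) pairs by a one-pass score->bucket dict (insertion order preserves stability), then emits buckets by descending distinct score, positive scores only.
import Mathlib
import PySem

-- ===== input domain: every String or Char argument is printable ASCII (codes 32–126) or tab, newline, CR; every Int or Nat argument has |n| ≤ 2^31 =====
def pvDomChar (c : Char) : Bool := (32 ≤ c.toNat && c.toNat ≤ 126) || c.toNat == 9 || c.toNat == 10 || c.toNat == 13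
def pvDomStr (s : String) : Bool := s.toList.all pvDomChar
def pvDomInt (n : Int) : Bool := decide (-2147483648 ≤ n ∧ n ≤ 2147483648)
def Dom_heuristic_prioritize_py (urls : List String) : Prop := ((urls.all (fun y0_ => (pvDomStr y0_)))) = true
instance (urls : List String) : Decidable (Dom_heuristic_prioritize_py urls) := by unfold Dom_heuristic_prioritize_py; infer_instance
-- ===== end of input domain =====

-- B replaces the stable comparison sort over (url, score) pairs by a score→bucket dict built
-- in one pass, emitting buckets by descending distinct score (positive scores only): alternative decomposition.

-- ===== PORT A =====
-- shared scoring helper (identical nested helper `score_url` in A / module helper `_score_url` in B)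
def pv_score (url : String) : Int :=
  let url_lower := PySem.Str.lower url
  let score : Int := 0
  let score := if PySem.Str.isIn ".edu" url_lower then score + 10 else score
  let score := if PySem.Str.isIn "athletics" url_lower then score + 5 else score
  let score := if PySem.Str.isIn "staff" url_lower || PySem.Str.isIn "coaches" url_lower then score + 3 else score
  let score := if PySem.Str.isIn "roster" url_lower then score + 2 else score
  let score := if ["twitter", "facebook", "instagram", "linkedin", "youtube"].any
      (fun site => PySem.Str.isIn site url_lower) then score - 20 else score
  let score := if ["news", "article", "blog", "medium"].any
      (fun site => PySem.Str.isIn site url_lower) then score - 10 else score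
  score

def heuristic_prioritize_py (urls : List String) : List String :=
  if urls = [] then []
  else
    let scored := urls.map (fun url => (url, pv_score url))
    let scored := PySem.List.sorted scored (fun x => x.2) true
    (scored.filter (fun p => p.2 > 0)).map (fun p => p.1)

-- ===== PORT B =====
def heuristic_prioritize_py_alt (urls : List String) : List String :=
  -- buckets.setdefault(score, []).append(url)  =  modify score [] (· ++ [url])
  let buckets : PySem.Dict Int (List String) :=
    urls.foldl (fun d url => d.modify (pv_score url) [] (fun v => v ++ [url])) PySem.Dict.empty
  -- for s in sorted(buckets, reverse=True): if s > 0: result.extend(buckets[s])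
  (PySem.List.sorted buckets.keys (fun s => s) true).foldl
    (fun result s => if s > 0 then result ++ buckets.getD s [] else result) []

-- ===== PRECONDITION & SPEC =====
def Spec_heuristic_prioritize_py (urls : List String) (out : List String) : Prop := out = heuristic_prioritize_py_alt urls
instance (urls : List String) (out : List String) : Decidable (Spec_heuristic_prioritize_py urls out) := by unfold Spec_heuristic_prioritize_py; infer_instance

-- ===== CLAIM (what is proved, stated in full; the proofs are below) =====
def Claim_equal_heuristic_prioritize_py : Prop := ∀ (urls : List String), Dom_heuristic_prioritize_py urls → Spec_heuristic_prioritize_py urls (heuristic_prioritize_py urls)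

-- ===== LEMMAS AND PROOFS =====

-- insertion of a new key into a strictly descending key list
def insK (k : Int) : List Int → List Int
  | [] => [k]
  | d :: ds => if k > d then k :: d :: ds else if k = d then d :: ds else d :: insK k ds

theorem mem_insK (k : Int) (ds : List Int) (s : Int) : s ∈ insK k ds ↔ s = k ∨ s ∈ ds := by
  induction ds with
  | nil => simp [insK]
  | cons d ds ih =>
      simp only [insK]
      split_ifs with h1 h2
      · simp [List.mem_cons]
      · subst h2; rw [List.mem_cons]; tauto
      · simp [List.mem_cons, ih]; tauto

theorem pairwise_insK (k : Int) (ds : List Int) (hp : ds.Pairwise (fun a b => b < a)) :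
    (insK k ds).Pairwise (fun a b => b < a) := by
  induction ds with
  | nil => simp [insK]
  | cons d ds ih =>
      rcases List.pairwise_cons.mp hp with ⟨hd, ht⟩
      simp only [insK]
      split_ifs with h1 h2
      · exact List.pairwise_cons.mpr ⟨by
          intro y hy
          rcases List.mem_cons.mp hy with rfl | hy
          · omega
          · have := hd y hy; omega, hp⟩
      · exact hp
      · refine List.pairwise_cons.mpr ⟨?_, ih ht⟩
        intro y hy
        rcases (mem_insK k ds y).mp hy with rfl | hy
        · omega
        · exact hd y hy

theorem nodup_insK (k : Int) (ds : List Int) (hp : ds.Pairwise (fun a b => b < a)) :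
    (insK k ds).Nodup := by
  exact (pairwise_insK k ds hp).imp fun {a b} h => (ne_of_lt h).symm

-- insertBy bumps x to the front when x goes before everything
theorem insertBy_all_true {α : Type} (before : α → α → Bool) (x : α) (ys : List α)
    (h : ∀ y ∈ ys, before x y = true) :
    PySem.List.insertBy before x ys = x :: ys := by
  cases ys with
  | nil => rfl
  | cons y ys => simp [PySem.List.insertBy, h y (List.mem_cons_self)]

theorem insertBy_append_skip {α : Type} (before : α → α → Bool) (x : α) (l1 l2 : List α)
    (h : ∀ y ∈ l1, before x y = false) :
    PySem.List.insertBy before x (l1 ++ l2) = l1 ++ PySem.List.insertBy before x l2 := by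
  induction l1 with
  | nil => rfl
  | cons y l1 ih =>
      simp only [List.cons_append, PySem.List.insertBy, h y (List.mem_cons_self)]
      simp only [Bool.false_eq_true, if_false, List.cons.injEq, true_and]
      exact ih (fun z hz => h z (List.mem_cons_of_mem _ hz))

-- core: inserting x into a bucket concatenation extends x's bucket (in the right place)
theorem insertBy_flatMap {α : Type} (key : α → Int) (x : α) (ds : List Int) (g : Int → List α)
    (hp : ds.Pairwise (fun a b => b < a))
    (hg : ∀ s ∈ ds, ∀ a ∈ g s, key a = s)
    (hnew : key x ∉ ds → g (key x) = []) :
    PySem.List.insertBy (fun a b => decide (key b < key a)) x (ds.flatMap g)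
      = (insK (key x) ds).flatMap (fun s => g s ++ if s = key x then [x] else []) := by
  induction ds with
  | nil =>
      have hkx : g (key x) = [] := hnew (by simp)
      simp [insK, hkx, PySem.List.insertBy]
  | cons d ds ih =>
      rcases List.pairwise_cons.mp hp with ⟨hd, ht⟩
      rcases lt_trichotomy d (key x) with h1 | h1 | h1
      · -- key x > d : x goes in front of everything
        have hins : insK (key x) (d :: ds) = key x :: d :: ds := by
          simp [insK, h1]
        have hkx : g (key x) = [] := by
          apply hnew
          intro hmem
          rcases List.mem_cons.mp hmem with h | hm
          · omega
          · have := hd _ hm; omega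
        have hall : ∀ y ∈ (d :: ds).flatMap g,
            (fun a b => decide (key b < key a)) x y = true := by
          intro y hy
          rcases List.mem_flatMap.mp hy with ⟨s, hs, hys⟩
          have hks : key y = s := hg s hs y hys
          have hlt : s < key x := by
            rcases List.mem_cons.mp hs with rfl | hm
            · omega
            · have := hd _ hm; omega
          simp [hks, hlt]
        have hrest : List.flatMap (fun s => g s ++ if s = key x then [x] else []) (d :: ds)
            = List.flatMap g (d :: ds) := by
          apply List.flatMap_congr
          intro s hs
          have hne : s ≠ key x := by
            rcases List.mem_cons.mp hs with rfl | hm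
            · omega
            · have := hd _ hm; omega
          simp [hne]
        rw [insertBy_all_true _ _ _ hall, hins]
        have hfm : List.flatMap (fun s => g s ++ if s = key x then [x] else []) (key x :: d :: ds)
            = (g (key x) ++ [x]) ++ List.flatMap g (d :: ds) := by
          rw [List.flatMap_cons, hrest, if_pos rfl]
        rw [hfm, hkx]
        simp
      · -- key x = d : x goes at the end of d's bucket
        have hins : insK (key x) (d :: ds) = d :: ds := by
          simp [insK, h1.symm]
        have hrest : List.flatMap (fun s => g s ++ if s = key x then [x] else []) ds
            = List.flatMap g ds := by
          apply List.flatMap_congr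
          intro s hs
          have := hd _ hs
          simp [show s ≠ key x by omega]
        rw [List.flatMap_cons, insertBy_append_skip _ _ _ _ (by
          intro y hy
          have hky : key y = d := hg d List.mem_cons_self y hy
          simp [hky, h1])]
        rw [insertBy_all_true _ _ _ (by
          intro y hy
          rcases List.mem_flatMap.mp hy with ⟨s, hs, hys⟩
          have hks : key y = s := hg s (List.mem_cons_of_mem _ hs) y hys
          have := hd _ hs
          simp only [decide_eq_true_eq, hks]
          omega)]
        rw [hins]
        have hfm : List.flatMap (fun s => g s ++ if s = key x then [x] else []) (d :: ds)
            = (g d ++ [x]) ++ List.flatMap g ds := by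
          rw [List.flatMap_cons, hrest, if_pos h1]
        rw [hfm]
        simp
      · -- key x < d : skip d's bucket, recurse
        have hins : insK (key x) (d :: ds) = d :: insK (key x) ds := by
          simp [insK, show ¬ (key x > d) by omega, show ¬ (key x = d) by omega]
        rw [List.flatMap_cons, insertBy_append_skip _ _ _ _ (by
          intro y hy
          have hky : key y = d := hg d List.mem_cons_self y hy
          simp only [decide_eq_false_iff_not, hky]
          omega)]
        rw [ih ht (fun s hs => hg s (List.mem_cons_of_mem _ hs))
          (fun hnm => hnew (by
            intro hmem
            rcases List.mem_cons.mp hmem with h | hm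
            · omega
            · exact hnm hm))]
        rw [hins]
        have hfm : List.flatMap (fun s => g s ++ if s = key x then [x] else []) (d :: insK (key x) ds)
            = g d ++ List.flatMap (fun s => g s ++ if s = key x then [x] else []) (insK (key x) ds) := by
          rw [List.flatMap_cons, if_neg (show ¬ d = key x by omega)]
          simp
        rw [hfm]

-- the descending distinct-key list of xs (under key)
def descKeys {α : Type} (key : α → Int) (xs : List α) : List Int :=
  PySem.List.sorted (PySem.List.dedup (xs.map key)) (fun s => s) true

theorem descKeys_pairwise {α : Type} (key : α → Int) (xs : List α) :
    (descKeys key xs).Pairwise (fun a b => b < a) := by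
  have h1 : (descKeys key xs).Pairwise (fun a b => b ≤ a) :=
    PySem.List.sorted_pairwise_rev _ _
  have h2 : (descKeys key xs).Nodup :=
    ((PySem.List.sorted_perm (PySem.List.dedup (xs.map key)) (fun s => s) true).nodup_iff).mpr
      (PySem.List.nodup_dedup _)
  have h3 := List.Pairwise.and h1 h2
  exact h3.imp (fun ⟨hle, hne⟩ => by omega)

theorem mem_descKeys {α : Type} (key : α → Int) (xs : List α) (s : Int) :
    s ∈ descKeys key xs ↔ s ∈ xs.map key := by
  rw [descKeys, PySem.List.mem_sorted, PySem.List.mem_dedup]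

theorem descKeys_snoc {α : Type} (key : α → Int) (xs : List α) (x : α) :
    descKeys key (xs ++ [x]) = insK (key x) (descKeys key xs) := by
  apply PySem.List.sorted_rev_eq_of_perm_of_pairwise_gt
  · rw [List.perm_ext_iff_of_nodup
      (nodup_insK _ _ (descKeys_pairwise key xs)) (PySem.List.nodup_dedup _)]
    intro a
    rw [mem_insK, PySem.List.mem_dedup, List.map_append, List.map_cons, List.map_nil]
    rw [show (descKeys key xs = descKeys key xs) from rfl]
    simp [mem_descKeys, or_comm]
  · exact pairwise_insK _ _ (descKeys_pairwise key xs)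

-- stable descending sort = concatenation of buckets by descending distinct key
theorem sorted_rev_eq_buckets {α : Type} (key : α → Int) (xs : List α) :
    PySem.List.sorted xs key true
      = (descKeys key xs).flatMap (fun s => xs.filter (fun a => key a == s)) := by
  induction xs using List.reverseRecOn with
  | nil => rfl
  | append_singleton xs x ih =>
      rw [PySem.List.sorted_rev_eq_foldl_insertBy, List.foldl_append, List.foldl_cons,
        List.foldl_nil, ← PySem.List.sorted_rev_eq_foldl_insertBy, ih,
        insertBy_flatMap key x _ _ (descKeys_pairwise key xs)
          (fun s _ a ha => by simpa using (List.mem_filter.mp ha).2)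
          (fun hnm => List.filter_eq_nil_iff.mpr (fun a ha hk => by
            exact hnm ((mem_descKeys key xs (key x)).mpr
              (List.mem_map.mpr ⟨a, ha, by simpa using hk.symm⟩)))),
        descKeys_snoc]
      apply List.flatMap_congr
      intro s _
      rw [List.filter_append]
      rcases eq_or_ne (key x) s with h | h
      · rw [h, if_pos rfl]
        simp [h]
      · rw [if_neg (Ne.symm h)]
        simp [h]

-- elements of the s-bucket all have snd = s, so the positivity filter is decided by s
theorem filter_pos_bucket (l : List (String × Int)) (s : Int) :
    (l.filter (fun p => p.2 == s)).filter (fun p => decide (p.2 > 0))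
      = if s > 0 then l.filter (fun p => p.2 == s) else [] := by
  induction l with
  | nil => simp
  | cons p l ih =>
      by_cases hp : p.2 = s <;> by_cases hs : s > 0 <;>
        simp [hp, hs, ih]

-- find? for an equality test finds the element itself
theorem find_self_of_mem (k : Int) (dd : List Int) (hm : k ∈ dd) :
    List.find? (fun s => s == k) dd = some k := by
  induction dd with
  | nil => simp at hm
  | cons d dd ih =>
      by_cases hdk : d = k
      · subst hdk; simp
      · rw [List.find?_cons_of_neg (by simpa using hdk)]
        exact ih (by
          rcases List.mem_cons.mp hm with h | h
          · exact absurd h.symm hdk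
          · exact h)

-- lookups in a dict whose items are one pair per key of dd
theorem getD_mk_map (dd : List Int) (f : Int → List String) (k : Int) (hm : k ∈ dd) :
    (PySem.Dict.mk (dd.map (fun s => (s, f s)))).getD k [] = f k := by
  simp only [PySem.Dict.getD, PySem.Dict.get?, List.find?_map, Function.comp_def]
  rw [show (fun s => ((s : Int), f s).1 == k) = (fun s => s == k) from rfl,
    find_self_of_mem k dd hm]
  rfl

theorem getD_mk_map_none (dd : List Int) (f : Int → List String) (k : Int) (hm : k ∉ dd) :
    (PySem.Dict.mk (dd.map (fun s => (s, f s)))).getD k [] = [] := by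
  simp only [PySem.Dict.getD, PySem.Dict.get?, List.find?_map, Function.comp_def]
  rw [show (fun s => ((s : Int), f s).1 == k) = (fun s => s == k) from rfl,
    List.find?_eq_none.mpr (fun s hs => by
      simp only [beq_iff_eq]
      intro h; exact hm (h ▸ hs))]
  rfl

theorem contains_mk_map (dd : List Int) (f : Int → List String) (k : Int) :
    (PySem.Dict.mk (dd.map (fun s => (s, f s)))).contains k = decide (k ∈ dd) := by
  simp only [PySem.Dict.contains, List.any_map, Function.comp_def]
  rcases Decidable.em (k ∈ dd) with h | h
  · simp only [decide_eq_true h, List.any_eq_true]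
    exact ⟨k, h, by simp⟩
  · simp only [decide_eq_false h, List.any_eq_false]
    intro s hs
    simp only [beq_iff_eq]
    intro he; exact h (he ▸ hs)

-- the dict built by B's loop: items = one pair per distinct score, bucket = input-order filter
theorem dict_items (us : List String) :
    (us.foldl (fun d url => d.modify (pv_score url) [] (fun v => v ++ [url]))
        PySem.Dict.empty).items
      = (PySem.List.dedup (us.map pv_score)).map
          (fun s => (s, us.filter (fun u => pv_score u == s))) := by
  induction us using List.reverseRecOn with
  | nil => rfl
  | append_singleton us u ih =>
      rw [List.foldl_append, List.foldl_cons, List.foldl_nil]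
      have hD : us.foldl (fun d url => d.modify (pv_score url) [] (fun v => v ++ [url]))
            PySem.Dict.empty
          = PySem.Dict.mk ((PySem.List.dedup (us.map pv_score)).map
              (fun s => (s, us.filter (fun u => pv_score u == s)))) :=
        PySem.Dict.ext ih
      rw [hD]
      have hdedup : PySem.List.dedup ((us ++ [u]).map pv_score)
          = if (PySem.List.dedup (us.map pv_score)).contains (pv_score u) = true
            then PySem.List.dedup (us.map pv_score)
            else PySem.List.dedup (us.map pv_score) ++ [pv_score u] := by
        rw [List.map_append, List.map_cons, List.map_nil]
        show PySem.Set.ofList (us.map pv_score ++ [pv_score u]) = _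
        rw [PySem.Set.ofList, List.foldl_append, List.foldl_cons, List.foldl_nil]
        rfl
      by_cases hmem : pv_score u ∈ PySem.List.dedup (us.map pv_score)
      · -- existing key: the value is updated in place
        have hc : (PySem.Dict.mk ((PySem.List.dedup (us.map pv_score)).map
            (fun s => (s, us.filter (fun u => pv_score u == s))))).contains (pv_score u)
            = true := by
          rw [contains_mk_map]; exact decide_eq_true hmem
        rw [hdedup, if_pos (List.elem_eq_true_of_mem hmem)]
        simp only [PySem.Dict.modify, PySem.Dict.insert, hc, if_pos,
          getD_mk_map _ _ _ hmem]
        rw [List.map_map]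
        apply List.map_congr_left
        intro s hs
        simp only [Function.comp_def]
        rcases eq_or_ne s (pv_score u) with rfl | hne
        · rw [if_pos (by simp), List.filter_append]
          simp
        · rw [if_neg (by simpa using hne), List.filter_append]
          simp [Ne.symm hne]
      · -- new key: appended at the end with bucket [u]
        have hc : (PySem.Dict.mk ((PySem.List.dedup (us.map pv_score)).map
            (fun s => (s, us.filter (fun u => pv_score u == s))))).contains (pv_score u)
            = false := by
          rw [contains_mk_map]; exact decide_eq_false hmem
        rw [hdedup, if_neg (by simpa using hmem)]
        simp only [PySem.Dict.modify, PySem.Dict.insert, hc, Bool.false_eq_true, if_false,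
          getD_mk_map_none _ _ _ hmem]
        rw [List.map_append, List.map_cons, List.map_nil]
        congr 1
        · apply List.map_congr_left
          intro s hs
          rw [List.filter_append]
          simp [show pv_score u ≠ s from fun h => hmem (h ▸ hs)]
        · have hfu : us.filter (fun u' => pv_score u' == pv_score u) = [] :=
            List.filter_eq_nil_iff.mpr (fun a ha h => hmem (by
              rw [PySem.List.mem_dedup]
              exact List.mem_map.mpr ⟨a, ha, by simpa using h⟩))
          rw [List.filter_append, hfu]
          simp

-- ===== VERDICT (by name: the statement is the Claim_ definition above) =====
theorem heuristic_prioritize_py_spec : Claim_equal_heuristic_prioritize_py := by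
  intro urls _
  show heuristic_prioritize_py urls = heuristic_prioritize_py_alt urls
  have hB : heuristic_prioritize_py_alt urls
      = (descKeys pv_score urls).flatMap
          (fun s => if s > 0 then urls.filter (fun u => pv_score u == s) else []) := by
    unfold heuristic_prioritize_py_alt
    show (PySem.List.sorted
        (urls.foldl (fun d url => d.modify (pv_score url) [] (fun v => v ++ [url]))
          PySem.Dict.empty).keys (fun s => s) true).foldl
      (fun result s => if s > 0 then result ++
        (urls.foldl (fun d url => d.modify (pv_score url) [] (fun v => v ++ [url]))
          PySem.Dict.empty).getD s [] else result) [] = _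
    have hkeys : (urls.foldl (fun d url => d.modify (pv_score url) [] (fun v => v ++ [url]))
        PySem.Dict.empty).keys = PySem.List.dedup (urls.map pv_score) := by
      rw [PySem.Dict.keys, dict_items, List.map_map]
      exact List.map_id _
    have hfold : ∀ (l : List Int) (acc : List String),
        (∀ s ∈ l, s ∈ PySem.List.dedup (urls.map pv_score)) →
        l.foldl (fun result s => if s > 0 then result ++
            (urls.foldl (fun d url => d.modify (pv_score url) [] (fun v => v ++ [url]))
              PySem.Dict.empty).getD s [] else result) acc
          = acc ++ l.flatMap (fun s => if s > 0 then urls.filter (fun u => pv_score u == s) else []) := by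
      intro l
      induction l with
      | nil => intro acc _; simp
      | cons s l ihl =>
          intro acc hmem
          have hgd : (urls.foldl (fun d url => d.modify (pv_score url) [] (fun v => v ++ [url]))
              PySem.Dict.empty).getD s []
              = urls.filter (fun u => pv_score u == s) := by
            have hsm := hmem s List.mem_cons_self
            rw [PySem.Dict.ext (dict_items urls), getD_mk_map _ _ _ hsm]

          rw [List.foldl_cons, List.flatMap_cons]
          by_cases hs : s > 0
          · rw [if_pos hs, hgd, ihl _ (fun t ht => hmem t (List.mem_cons_of_mem _ ht)),
              if_pos hs, List.append_assoc]
          · rw [if_neg hs, ihl _ (fun t ht => hmem t (List.mem_cons_of_mem _ ht)), if_neg hs,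
              List.nil_append]
    rw [hkeys, hfold _ [] (fun s hs => (PySem.List.mem_sorted _ _ _ s).mp hs), List.nil_append]
    rfl
  rcases eq_or_ne urls [] with rfl | hne
  · simp [heuristic_prioritize_py, hB, descKeys]
  · unfold heuristic_prioritize_py
    rw [if_neg hne, hB]
    show ((PySem.List.sorted (urls.map (fun url => (url, pv_score url))) (fun x => x.2) true).filter
        (fun p => decide (p.2 > 0))).map (fun p => p.1) = _
    rw [sorted_rev_eq_buckets (fun p => p.2) (urls.map (fun url => (url, pv_score url)))]
    rw [List.filter_flatMap, List.map_flatMap]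
    have hKeq : descKeys (fun p => (p : String × Int).2) (urls.map (fun url => (url, pv_score url)))
        = descKeys pv_score urls := by
      unfold descKeys
      rw [List.map_map]
      rfl
    rw [hKeq]
    apply List.flatMap_congr
    intro s _
    rw [filter_pos_bucket]
    by_cases hs : s > 0
    · rw [if_pos hs, if_pos hs, List.filter_map, List.map_map]
      exact List.map_id _
    · rw [if_neg hs, if_neg hs, List.map_nil]
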